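-- pv_equiv track=rewrite | github.com/therealharish/Problem-Solving | Hackerrank/Equal Stacks.py | equalStacks
-- ===== SOURCE A (Python) =====
-- def equalStacks(h1, h2, h3):
--   h1.reverse()
--   h2.reverse()
--   h3.reverse()
--   for i in range(1,len(h1)):
--     h1[i]=h1[i-1]+h1[i]
--   for i in range(1,len(h2)):
--     h2[i]=h2[i-1]+h2[i]
--   for i in range(1,len(h3)):
--     h3[i]=h3[i-1]+h3[i]
--   h1.reverse()
--   h2.reverse()
--   h3.reverse()
--   while(h1 and h2 and h3):
--     s=min(h1[0], h2[0], h3[0])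
--     while(h1 and s<h1[0]):
--       h1.pop(0)
--     while(h2 and s<h2[0]):
--       h2.pop(0)
--     while(h3 and s<h3[0]):
--       h3.pop(0)
--     if(h1 and h2 and h3):
--       if(h1[0]== h2[0] and h1[0]== h3[0]):
--         return h1[0]
--     else:
--       break;
--   return 0
-- ===== SOURCE B (Python) =====
-- def equalStacks(h1, h2, h3):
--     # Return-value equivalent to A; does NOT mutate its arguments (A reverses/pops them).
--     def suffix(h):
--         t = sum(h)
--         out = []
--         for x in h:
--             out.append(t)
--             t -= x
--         return out
--     a, b, c = suffix(h1), suffix(h2), suffix(h3)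
--     n1, n2, n3 = len(a), len(b), len(c)
--     i = j = k = 0
--     while i < n1 and j < n2 and k < n3:
--         s = min(a[i], b[j], c[k])
--         while i < n1 and s < a[i]:
--             i += 1
--         while j < n2 and s < b[j]:
--             j += 1
--         while k < n3 and s < c[k]:
--             k += 1
--         if i < n1 and j < n2 and k < n3:
--             if a[i] == b[j] and a[i] == c[k]:
--                 return a[i]
--         else:
--             break
--     return 0
-- ===== Notes on version B (the rewrite author's own statement) =====
-- stated objective: faster
-- what changed: B computes suffix sums in one forward pass (running total minus elements, no reversing) and replaces A's destructive pop(0) scanning of three lists by a three-index descent over immutable arrays, removing the O(n) cost of each pop; B does not mutate its arguments while A does.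
import Mathlib
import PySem

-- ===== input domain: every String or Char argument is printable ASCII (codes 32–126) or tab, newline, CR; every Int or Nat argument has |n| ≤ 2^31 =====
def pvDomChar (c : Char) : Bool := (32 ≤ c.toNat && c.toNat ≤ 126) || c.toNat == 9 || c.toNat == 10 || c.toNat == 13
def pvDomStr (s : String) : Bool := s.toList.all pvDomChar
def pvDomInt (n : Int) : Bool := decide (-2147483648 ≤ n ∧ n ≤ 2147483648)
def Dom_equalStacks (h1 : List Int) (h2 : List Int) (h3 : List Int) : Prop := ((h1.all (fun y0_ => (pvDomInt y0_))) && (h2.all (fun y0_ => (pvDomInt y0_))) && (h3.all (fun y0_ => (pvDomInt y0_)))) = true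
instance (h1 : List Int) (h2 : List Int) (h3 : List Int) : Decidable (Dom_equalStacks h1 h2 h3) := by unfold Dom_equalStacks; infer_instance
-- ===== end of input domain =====

-- B: one-pass suffix sums + three-index descent over immutable arrays instead of A's
-- in-place reverse/prefix-sum/reverse and repeated pop(0); return-value equivalence only
-- (A mutates its arguments, B does not).

-- ===== PORT A =====

-- for i in range(1,len(h)): h[i] = h[i-1] + h[i]   (carrying the previous cumulated value)
def pvPrefA (prev : Int) : List Int → List Int
  | [] => []
  | x :: xs => (prev + x) :: pvPrefA (prev + x) xs

-- h.reverse(); prefix-sum loop; h.reverse()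
def pvSuffA (h : List Int) : List Int :=
  (match h.reverse with
   | [] => []
   | x :: xs => x :: pvPrefA x xs).reverse

-- while(h and s < h[0]): h.pop(0)
def pvPopA (s : Int) : List Int → List Int
  | [] => []
  | x :: xs => if s < x then pvPopA s xs else x :: xs

-- the outer while loop; fuel = total length + 1 suffices (each recursive call pops ≥ 1 element)
def pvLoopA : Nat → List Int → List Int → List Int → Int
  | 0, _, _, _ => 0
  | fuel + 1, l1, l2, l3 =>
    match l1, l2, l3 with
    | x :: _, y :: _, z :: _ =>
      let s := min x (min y z)
      let l1' := pvPopA s l1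
      let l2' := pvPopA s l2
      let l3' := pvPopA s l3
      match l1', l2', l3' with
      | a :: _, b :: _, c :: _ =>
        if a = b ∧ a = c then a else pvLoopA fuel l1' l2' l3'
      | _, _, _ => 0
    | _, _, _ => 0

def equalStacks (h1 : List Int) (h2 : List Int) (h3 : List Int) : Int :=
  pvLoopA (h1.length + h2.length + h3.length + 1) (pvSuffA h1) (pvSuffA h2) (pvSuffA h3)

-- ===== PORT B =====

-- t = sum(h); for x in h: out.append(t); t -= x
def pvSuffB (t : Int) : List Int → List Int
  | [] => []
  | x :: xs => t :: pvSuffB (t - x) xs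

-- while i < n and s < a[i]: i += 1
def pvAdvB (s : Int) (a : List Int) (i : Nat) : Nat :=
  if _h : i < a.length ∧ s < a.getD i 0 then pvAdvB s a (i + 1) else i
termination_by a.length - i
decreasing_by omega

-- the outer while loop over indices; same fuel bound
def pvLoopB (a b c : List Int) : Nat → Nat → Nat → Nat → Int
  | 0, _, _, _ => 0
  | fuel + 1, i, j, k =>
    if i < a.length ∧ j < b.length ∧ k < c.length then
      let s := min (a.getD i 0) (min (b.getD j 0) (c.getD k 0))
      let i' := pvAdvB s a i
      let j' := pvAdvB s b j
      let k' := pvAdvB s c k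
      if i' < a.length ∧ j' < b.length ∧ k' < c.length then
        if a.getD i' 0 = b.getD j' 0 ∧ a.getD i' 0 = c.getD k' 0 then a.getD i' 0
        else pvLoopB a b c fuel i' j' k'
      else 0
    else 0

def equalStacks_alt (h1 : List Int) (h2 : List Int) (h3 : List Int) : Int :=
  pvLoopB (pvSuffB h1.sum h1) (pvSuffB h2.sum h2) (pvSuffB h3.sum h3)
    (h1.length + h2.length + h3.length + 1) 0 0 0

-- ===== PRECONDITION & SPEC =====
def Spec_equalStacks (h1 : List Int) (h2 : List Int) (h3 : List Int) (out : Int) : Prop := out = equalStacks_alt h1 h2 h3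
instance (h1 : List Int) (h2 : List Int) (h3 : List Int) (out : Int) : Decidable (Spec_equalStacks h1 h2 h3 out) := by unfold Spec_equalStacks; infer_instance

-- ===== CLAIM (what is proved, stated in full; the proofs are below) =====
def Claim_equal_equalStacks : Prop := ∀ (h1 : List Int) (h2 : List Int) (h3 : List Int), Dom_equalStacks h1 h2 h3 → Spec_equalStacks h1 h2 h3 (equalStacks h1 h2 h3)

-- ===== LEMMAS AND PROOFS =====

-- both suffix-sum computations equal the canonical suffix-sum list
def pvSuffSpec : List Int → List Int
  | [] => []
  | x :: xs => (x + xs.sum) :: pvSuffSpec xs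

lemma pvPrefA_append (a y : Int) (l : List Int) :
    pvPrefA a (l ++ [y]) = pvPrefA a l ++ [a + l.sum + y] := by
  induction l generalizing a with
  | nil => simp [pvPrefA]
  | cons x xs ih => simp [pvPrefA, ih]; ring_nf

lemma pvSuffA_eq_spec (h : List Int) : pvSuffA h = pvSuffSpec h := by
  have key : ∀ (l : List Int), (pvPrefA 0 l.reverse).reverse = pvSuffSpec l := by
    intro l
    induction l with
    | nil => simp [pvPrefA, pvSuffSpec]
    | cons x xs ih =>
      have : (x :: xs).reverse = xs.reverse ++ [x] := by simp
      rw [this, pvPrefA_append]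
      simp [pvSuffSpec, ← ih]
      ring_nf
  have base : ∀ (r : List Int),
      (match r with
       | [] => ([] : List Int)
       | x :: xs => x :: pvPrefA x xs) = pvPrefA 0 r := by
    intro r
    cases r with
    | nil => rfl
    | cons x xs => simp [pvPrefA]
  unfold pvSuffA
  rw [base, key]

lemma pvSuffB_eq_spec (h : List Int) : pvSuffB h.sum h = pvSuffSpec h := by
  induction h with
  | nil => rfl
  | cons x xs ih => simp [pvSuffB, pvSuffSpec, ih]

-- advancing the index mirrors popping from the front of the suffix
lemma pvAdvB_drop (s : Int) (a : List Int) (i : Nat) (hi : i ≤ a.length) :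
    pvPopA s (a.drop i) = a.drop (pvAdvB s a i) ∧
    i ≤ pvAdvB s a i ∧ pvAdvB s a i ≤ a.length := by
  by_cases h : i < a.length
  · have hd : a.drop i = a[i] :: a.drop (i + 1) := List.drop_eq_getElem_cons h
    by_cases hs : s < a.getD i 0
    · have hg : a.getD i 0 = a[i] := by rw [List.getD_eq_getElem _ _ h]
      have hrec := pvAdvB_drop s a (i + 1) (by omega)
      rw [pvAdvB]
      simp only [h, hs, and_self, dif_pos]
      refine ⟨?_, by omega, hrec.2.2⟩
      rw [hd, pvPopA]
      rw [hg] at hs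
      simp [hs, hrec.1]
    · rw [pvAdvB]
      have : ¬ (i < a.length ∧ s < a.getD i 0) := by tauto
      simp only [this, dif_neg, not_false_iff]
      refine ⟨?_, le_refl _, hi⟩
      have hg : a.getD i 0 = a[i] := by rw [List.getD_eq_getElem _ _ h]
      rw [hg] at hs
      rw [hd, pvPopA]
      simp [hs]
  · have hie : i = a.length := by omega
    rw [pvAdvB]
    have : ¬ (i < a.length ∧ s < a.getD i 0) := by omega
    simp only [this, dif_neg, not_false_iff]
    subst hie
    simp [pvPopA]
termination_by a.length - i
decreasing_by omega

-- unfolding lemmas for one iteration of each loop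
lemma pvLoopA_cons (n : Nat) (x y z : Int) (t1 t2 t3 : List Int) :
    pvLoopA (n + 1) (x :: t1) (y :: t2) (z :: t3) =
      (match pvPopA (min x (min y z)) (x :: t1), pvPopA (min x (min y z)) (y :: t2),
             pvPopA (min x (min y z)) (z :: t3) with
       | a :: _, b :: _, c :: _ =>
         if a = b ∧ a = c then a
         else pvLoopA n (pvPopA (min x (min y z)) (x :: t1)) (pvPopA (min x (min y z)) (y :: t2))
                (pvPopA (min x (min y z)) (z :: t3))
       | _, _, _ => 0) := rfl

lemma pvLoopB_succ (p q r : List Int) (n i j k : Nat)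
    (h1 : i < p.length) (h2 : j < q.length) (h3 : k < r.length) :
    pvLoopB p q r (n + 1) i j k =
      (let s := min (p.getD i 0) (min (q.getD j 0) (r.getD k 0))
       let i' := pvAdvB s p i
       let j' := pvAdvB s q j
       let k' := pvAdvB s r k
       if i' < p.length ∧ j' < q.length ∧ k' < r.length then
         if p.getD i' 0 = q.getD j' 0 ∧ p.getD i' 0 = r.getD k' 0 then p.getD i' 0
         else pvLoopB p q r n i' j' k'
       else 0) := by
  rw [pvLoopB, if_pos ⟨h1, h2, h3⟩]

lemma drop_cons_getD (p : List Int) (i : Nat) (h : i < p.length) :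
    p.drop i = p.getD i 0 :: p.drop (i + 1) := by
  rw [List.getD_eq_getElem _ _ h]; exact List.drop_eq_getElem_cons h

-- the two outer loops agree, relating A's popped lists to B's indices via drop
lemma pvLoop_eq (p q r : List Int) :
    ∀ (fuel : Nat) (i j k : Nat), i ≤ p.length → j ≤ q.length → k ≤ r.length →
    pvLoopA fuel (p.drop i) (q.drop j) (r.drop k) = pvLoopB p q r fuel i j k := by
  intro fuel
  induction fuel with
  | zero => intro i j k _ _ _; rfl
  | succ n ih =>
    intro i j k hi hj hk
    by_cases hik : i < p.length ∧ j < q.length ∧ k < r.length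
    · obtain ⟨h1, h2, h3⟩ := hik
      have da := drop_cons_getD p i h1
      have db := drop_cons_getD q j h2
      have dc := drop_cons_getD r k h3
      set s := min (p.getD i 0) (min (q.getD j 0) (r.getD k 0)) with hs
      have ha := pvAdvB_drop s p i h1.le
      have hb := pvAdvB_drop s q j h2.le
      have hc := pvAdvB_drop s r k h3.le
      rw [da, db, dc, pvLoopA_cons, pvLoopB_succ p q r n i j k h1 h2 h3]
      rw [← hs, ← da, ← db, ← dc, ha.1, hb.1, hc.1]
      set i' := pvAdvB s p i with hi'
      set j' := pvAdvB s q j with hj'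
      set k' := pvAdvB s r k with hk'
      by_cases hik' : i' < p.length ∧ j' < q.length ∧ k' < r.length
      · obtain ⟨h1', h2', h3'⟩ := hik'
        have da' := drop_cons_getD p i' h1'
        have db' := drop_cons_getD q j' h2'
        have dc' := drop_cons_getD r k' h3'
        rw [if_pos ⟨h1', h2', h3'⟩, da', db', dc']
        by_cases heq : p.getD i' 0 = q.getD j' 0 ∧ p.getD i' 0 = r.getD k' 0
        · rw [if_pos heq]
          simp only [← hi']
          rw [if_pos heq]
        · rw [if_neg heq]
          simp only [← hi', ← hj', ← hk']
          rw [if_neg heq, ← da', ← db', ← dc']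
          exact ih i' j' k' ha.2.2 hb.2.2 hc.2.2
      · rw [if_neg hik']
        have hz : p.drop i' = [] ∨ q.drop j' = [] ∨ r.drop k' = [] := by
          rcases not_and_or.mp hik' with h' | h'
          · left; have : i' = p.length := by have := ha.2.2; omega
            simp [this]
          · rcases not_and_or.mp h' with h' | h'
            · right; left; have : j' = q.length := by have := hb.2.2; omega
              simp [this]
            · right; right; have : k' = r.length := by have := hc.2.2; omega
              simp [this]
        rcases hz with h' | h' | h'
        · rw [h']
        · rw [h']
          cases p.drop i' <;> rfl
        · rw [h']
          cases p.drop i' <;> cases q.drop j' <;> rfl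
    · -- while condition false: both 0
      have hR : pvLoopB p q r (n + 1) i j k = 0 := by
        rw [pvLoopB]; simp only [hik, if_neg, not_false_iff]
      rw [hR]
      rcases not_and_or.mp hik with h | h
      · have h0 : p.drop i = [] := by
          have : i = p.length := by omega
          simp [this]
        rw [h0]; rfl
      · rcases not_and_or.mp h with h | h
        · have h0 : q.drop j = [] := by
            have : j = q.length := by omega
            simp [this]
          rw [h0]; cases p.drop i <;> rfl
        · have h0 : r.drop k = [] := by
            have : k = r.length := by omega
            simp [this]
          rw [h0]; cases p.drop i <;> cases q.drop j <;> rfl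

-- ===== VERDICT (by name: the statement is the Claim_ definition above) =====
theorem equalStacks_spec : Claim_equal_equalStacks := by
  intro h1 h2 h3 _
  unfold Spec_equalStacks equalStacks equalStacks_alt
  rw [pvSuffA_eq_spec, pvSuffA_eq_spec, pvSuffA_eq_spec,
      pvSuffB_eq_spec, pvSuffB_eq_spec, pvSuffB_eq_spec]
  have := pvLoop_eq (pvSuffSpec h1) (pvSuffSpec h2) (pvSuffSpec h3)
    (h1.length + h2.length + h3.length + 1) 0 0 0
    (by omega) (by omega) (by omega)
  simpa using this
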